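-- pv_equiv track=rewrite | github.com/Nick648/Math_Arrays_etc_Python | Math_Arrays_etc/Pyramid_counter.py | counter_items
-- ===== SOURCE A (Python) =====
-- def counter_items(floors, card=0):
--     count = 0
--     for i in range(1, floors + 1):
--         if card == 0:
--             count += i
--         else:
--             count += i * 2
--             if i > 1:
--                 count += (i - 1)
--     return count
-- ===== SOURCE B (Python) =====
-- def counter_items(floors, card=0):
--     n = max(floors, 0)
--     if card == 0:
--         return n * (n + 1) // 2
--     return (3 * n * n + n) // 2
-- ===== Notes on version B (the rewrite author's own statement) =====
-- stated objective: faster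
-- what changed: Replaces the O(floors) accumulation loop with closed-form triangular-number formulas n(n+1)/2 and (3n^2+n)/2.
import Mathlib
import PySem

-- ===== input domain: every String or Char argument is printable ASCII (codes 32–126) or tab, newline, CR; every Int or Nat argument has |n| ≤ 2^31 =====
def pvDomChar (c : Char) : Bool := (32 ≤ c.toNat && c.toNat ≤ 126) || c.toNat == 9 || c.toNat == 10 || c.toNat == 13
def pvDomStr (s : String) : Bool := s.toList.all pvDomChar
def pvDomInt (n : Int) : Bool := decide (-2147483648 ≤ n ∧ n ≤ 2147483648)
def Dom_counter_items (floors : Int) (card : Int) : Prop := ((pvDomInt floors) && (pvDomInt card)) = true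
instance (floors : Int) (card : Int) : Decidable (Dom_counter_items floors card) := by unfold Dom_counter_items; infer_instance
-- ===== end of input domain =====

-- B replaces A's per-floor loop by closed-form triangular-number formulas (O(1) instead of O(floors)).

-- ===== PORT A =====
def counter_items (floors : Int) (card : Int) : Int :=
  (PySem.List.pyRange 1 (floors + 1) 1).foldl
    (fun count i =>
      if card = 0 then count + i
      else
        let count := count + i * 2
        if i > 1 then count + (i - 1) else count) 0

-- ===== PORT B =====
def counter_items_alt (floors : Int) (card : Int) : Int :=
  let n := max floors 0
  if card = 0 then PySem.Int.floordiv (n * (n + 1)) 2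
  else PySem.Int.floordiv (3 * n * n + n) 2

-- ===== PRECONDITION & SPEC =====
def Spec_counter_items (floors : Int) (card : Int) (out : Int) : Prop := out = counter_items_alt floors card
instance (floors : Int) (card : Int) (out : Int) : Decidable (Spec_counter_items floors card out) := by unfold Spec_counter_items; infer_instance

-- ===== CLAIM (what is proved, stated in full; the proofs are below) =====
def Claim_equal_counter_items : Prop := ∀ (floors : Int) (card : Int), Dom_counter_items floors card → Spec_counter_items floors card (counter_items floors card)

-- ===== LEMMAS AND PROOFS =====

-- Doubling A's loop result gives a polynomial in the number of floors.
theorem two_mul_counter_items (n : Nat) (card : Int) :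
    2 * counter_items (n : Int) card =
      if card = 0 then (n : Int) * (n + 1) else 3 * (n : Int) * n + n := by
  by_cases h0 : card = 0
  · rw [if_pos h0]
    simp only [counter_items, h0, if_true]
    induction n with
    | zero => simp [PySem.List.pyRange_one_eq_nil]
    | succ n ih =>
      have h : PySem.List.pyRange 1 (((n + 1 : Nat) : Int) + 1) 1
          = PySem.List.pyRange 1 ((n : Int) + 1) 1 ++ [(n : Int) + 1] := by
        push_cast
        exact PySem.List.pyRange_one_succ_right (by omega)
      rw [h, List.foldl_append]
      simp only [List.foldl]
      push_cast
      linear_combination ih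
  · rw [if_neg h0]
    simp only [counter_items, h0, if_false]
    induction n with
    | zero => simp [PySem.List.pyRange_one_eq_nil]
    | succ n ih =>
      have h : PySem.List.pyRange 1 (((n + 1 : Nat) : Int) + 1) 1
          = PySem.List.pyRange 1 ((n : Int) + 1) 1 ++ [(n : Int) + 1] := by
        push_cast
        exact PySem.List.pyRange_one_succ_right (by omega)
      rw [h, List.foldl_append]
      simp only [List.foldl]
      by_cases h1 : ((n : Int) + 1) > 1
      · rw [if_pos h1]
        push_cast
        linear_combination ih
      · have hn : n = 0 := by omega
        subst hn
        rw [if_neg h1]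
        simp [PySem.List.pyRange_one_eq_nil]

theorem counter_items_eq (floors card : Int) :
    counter_items floors card = counter_items_alt floors card := by
  rcases le_or_gt floors 0 with hle | hpos
  · have hr : PySem.List.pyRange 1 (floors + 1) 1 = [] :=
      PySem.List.pyRange_one_eq_nil (by omega)
    have hn : max floors 0 = 0 := max_eq_right hle
    simp [counter_items, counter_items_alt, hr, hn, PySem.Int.floordiv]
  · obtain ⟨n, rfl⟩ : ∃ n : Nat, floors = (n : Int) :=
      ⟨floors.toNat, (Int.toNat_of_nonneg (by omega)).symm⟩
    have hmax : max ((n : Int)) 0 = (n : Int) := max_eq_left (Int.natCast_nonneg n)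
    have h2 := two_mul_counter_items n card
    unfold counter_items_alt
    rw [hmax]
    by_cases h0 : card = 0
    · rw [if_pos h0] at h2
      rw [if_pos h0, PySem.Int.floordiv_eq_ediv_of_pos (by norm_num), ← h2,
        Int.mul_ediv_cancel_left _ (by norm_num)]
    · rw [if_neg h0] at h2
      rw [if_neg h0, PySem.Int.floordiv_eq_ediv_of_pos (by norm_num), ← h2,
        Int.mul_ediv_cancel_left _ (by norm_num)]

-- ===== VERDICT (by name: the statement is the Claim_ definition above) =====
theorem counter_items_spec : Claim_equal_counter_items := by
  intro floors card _
  exact counter_items_eq floors card
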